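-- pv_equiv track=rewrite | github.com/robinsonmc/shearer-data | hysteresis.py | new_score
-- ===== SOURCE A (Python) =====
-- def new_score(labels,result):
--     '''
--     Given a set of labels and results implement the frame labelling from
--     Ward et al (2011) metric for scoring activity recognition
--     '''
--     from copy import copy
--     labels = list(labels)
--     for i in range(len(labels)):
--         if labels[i] == 'shearing':
--             labels[i] = 1
--         if labels[i] == 'catch_drag':
--             labels[i] = 0
--
--     if len(result) - len(labels) == 1:
--         result = result[1:]
--     elif len(result) - len(labels) > 1:
--         result = result[1:-1]
--
--     assert(len(result) == len(labels))
--
--     r_label = []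
--     for i in range(len(result)):
--         if result[i] == 1:
--             if labels[i] == 1:
--                 r_label.append('TP')
--             else:
--                 r_label.append('FP')
--         elif result[i] == 0:
--             if labels[i] == 0:
--                 r_label.append('TN')
--             else:
--                 r_label.append('FN')
--         else:
--             raise Exception('Non-zero or one value found')
--
--     r_label.append('END')
--     #Assign each frame based on classification
--     last_segment = 'START'
--     final = copy(r_label)
--     i = 0
--     while i < len(r_label):
--         j = 0
--         if r_label[i+j] == 'END': break
--         while r_label[i+j] == r_label[i+j+1]:
--             j+=1
--         temp_last_segment = r_label[i+j]
--         seg = classify(last_segment,r_label[i+j],r_label[i+j+1])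
--         final[i:i+j+1] = [seg for x in final[i:i+j+1]]
--         last_segment = temp_last_segment
--         i = i+j+1
--     return count_of(final[:-1])
--
-- def classify(F,M,L):
--     encoding = {'START': '0', 'FP': '1', 'FN': '2', 'TP': '3', 'TN': '4',\
--                 'END': '5'}
--     lookup = {'014': 'M','012': 'M','024': 'D','021': 'D','013': 'Os',\
--               '023': 'Us','313': 'M','323': 'F','413': 'Os','213': 'Os',\
--               '423': 'Us','123': 'Us','414': 'I','214': 'I','412': 'I',\
--               '212': 'I','424': 'D','124': 'D','121': 'D','421': 'D',\
--               '314': 'Oe','312': 'Oe','324': 'Ue','321': 'Ue','415': 'I',\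
--               '215': 'I','425': 'D','125': 'D','315': 'Oe','325': 'Ue'}
--     if encoding[M] == '3':
--         return 'TP'
--     if encoding[M] == '4':
--         return 'TN'
--     return lookup[encoding[F] + encoding[M] + encoding[L]]
--
-- def count_of(final):
--     TP_count = final.count('TP')
--     TN_count = final.count('TN')
--     M_count  = final.count('M')
--     I_count  = final.count('I')
--     D_count  = final.count('D')
--     F_count  = final.count('F')
--     U_count  = final.count('Us') + final.count('Ue')
--     O_count  = final.count('Os') + final.count('Oe')
--
--     result_dict = {}
--
--     result_dict['TP'] = TP_count
--     result_dict['TN'] = TN_count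
--     result_dict['M'] = M_count
--     result_dict['I'] = I_count
--     result_dict['D'] = D_count
--     result_dict['F'] = F_count
--     result_dict['U'] = U_count
--     result_dict['O'] = O_count
--     result_dict['total'] = len(final)
--     return result_dict
-- ===== SOURCE B (Python) =====
-- def new_score(labels, result):
--     '''
--     Given a set of labels and results implement the frame labelling from
--     Ward et al (2011) metric for scoring activity recognition
--     '''
--     lab = [1 if x == 'shearing' else 0 if x == 'catch_drag' else x
--            for x in labels]
--     d = len(result) - len(lab)
--     if d == 1:
--         result = result[1:]
--     elif d > 1:
--         result = result[1:-1]
--     assert len(result) == len(lab)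
--
--     def frame(r, l):
--         if r == 1:
--             return 'TP' if l == 1 else 'FP'
--         if r == 0:
--             return 'TN' if l == 0 else 'FN'
--         raise Exception('Non-zero or one value found')
--
--     frames = [frame(r, l) for r, l in zip(result, lab)]
--     n = len(frames)
--     # prevd[i]: nearest earlier frame value different from frames[i] ('START' if none)
--     prevd = [None] * n
--     for i in range(n):
--         prevd[i] = 'START' if i == 0 else \
--             (frames[i - 1] if frames[i - 1] != frames[i] else prevd[i - 1])
--     # nextd[i]: nearest later frame value different from frames[i] ('END' if none)
--     nextd = [None] * n
--     for i in range(n - 1, -1, -1):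
--         nextd[i] = 'END' if i == n - 1 else \
--             (frames[i + 1] if frames[i + 1] != frames[i] else nextd[i + 1])
--
--     counts = {'TP': 0, 'TN': 0, 'M': 0, 'I': 0, 'D': 0, 'F': 0,
--               'U': 0, 'O': 0, 'total': 0}
--     for p, c, nx in zip(prevd, frames, nextd):
--         counts[segment_kind(p, c, nx)] += 1
--         counts['total'] += 1
--     return counts
--
--
-- def segment_kind(prev, cur, nxt):
--     # decision tree equivalent to Ward et al's segment lookup table,
--     # with Us/Ue already folded to 'U' and Os/Oe to 'O'
--     if cur == 'TP':
--         return 'TP'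
--     if cur == 'TN':
--         return 'TN'
--     if cur == 'FP':
--         if prev == 'TP':
--             return 'M' if nxt == 'TP' else 'O'
--         if nxt == 'TP':
--             return 'O'
--         return 'M' if prev == 'START' else 'I'
--     if prev == 'TP':
--         return 'F' if nxt == 'TP' else 'U'
--     if nxt == 'TP':
--         return 'U'
--     return 'D'
-- ===== Notes on version B (the rewrite author's own statement) =====
-- stated objective: alternative
-- what changed: B never detects runs: where A's nested while loops scan each maximal run, rewrite a copied final array by slice assignment and then make nine .count passes, B computes per-frame nearest-different-neighbour arrays prevd/nextd by one forward and one backward propagation pass, classifies every frame independently with a decision tree (replacing A's encoding dict + string-keyed lookup table) and tallies each frame straight into the result dict.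
import Mathlib
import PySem

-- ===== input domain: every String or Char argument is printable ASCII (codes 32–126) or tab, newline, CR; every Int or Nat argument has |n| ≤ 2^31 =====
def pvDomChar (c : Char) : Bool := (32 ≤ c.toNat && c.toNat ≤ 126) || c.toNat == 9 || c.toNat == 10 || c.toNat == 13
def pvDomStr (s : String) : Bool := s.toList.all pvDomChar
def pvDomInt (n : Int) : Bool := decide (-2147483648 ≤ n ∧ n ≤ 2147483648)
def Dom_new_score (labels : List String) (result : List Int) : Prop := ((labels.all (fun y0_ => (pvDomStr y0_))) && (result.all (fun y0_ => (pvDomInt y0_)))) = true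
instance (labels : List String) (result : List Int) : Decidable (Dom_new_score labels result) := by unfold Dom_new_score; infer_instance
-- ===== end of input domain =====

-- B replaces A's run-scanning while loop over a mutated `final` array and the nine
-- trailing .count passes by per-frame nearest-different-neighbour arrays (one forward
-- and one backward propagation pass), classifying every frame independently with a
-- decision tree and tallying straight into the result dict.

-- ===== PORT A =====

-- shared preprocessing (identical in Source A and Source B): label conversion and the result
-- length adjustment (result[1:] / result[1:-1])
def pvConv (s : String) : Sum Int String :=
  if s = "shearing" then Sum.inl 1
  else if s = "catch_drag" then Sum.inl 0
  else Sum.inr s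

def pvAdjust (labels : List String) (result : List Int) : List Int :=
  if (result.length : Int) - (labels.length : Int) = 1 then PySem.List.slice result (some 1) none
  else if (result.length : Int) - (labels.length : Int) > 1 then PySem.List.slice result (some 1) (some (-1))
  else result

-- the r_label frame for one (result, label) pair; "ERR" marks the branch where the
-- Python raises Exception('Non-zero or one value found') — excluded by Pre_
def pvFrame (r : Int) (l : Sum Int String) : String :=
  if r = 1 then (if l = Sum.inl 1 then "TP" else "FP")
  else if r = 0 then (if l = Sum.inl 0 then "TN" else "FN")
  else "ERR"

def pvRLabel : List Int → List (Sum Int String) → List String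
  | r :: rt, l :: lt => pvFrame r l :: pvRLabel rt lt
  | _, _ => []

-- classify's encoding dict; the single-character digit strings '0'..'5' are represented
-- as the numbers 0..5 (exact: keys of `lookup` become 3-digit base-10 numbers);
-- 9 marks a key absent from `encoding` (KeyError, outside Pre_)
def pvEncode (s : String) : Nat :=
  if s = "START" then 0 else if s = "FP" then 1 else if s = "FN" then 2
  else if s = "TP" then 3 else if s = "TN" then 4 else if s = "END" then 5 else 9

def pvLookup : PySem.Dict Nat String := PySem.Dict.ofList
  [(14,"M"),(12,"M"),(24,"D"),(21,"D"),(13,"Os"),(23,"Us"),(313,"M"),(323,"F"),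
   (413,"Os"),(213,"Os"),(423,"Us"),(123,"Us"),(414,"I"),(214,"I"),(412,"I"),
   (212,"I"),(424,"D"),(124,"D"),(121,"D"),(421,"D"),(314,"Oe"),(312,"Oe"),
   (324,"Ue"),(321,"Ue"),(415,"I"),(215,"I"),(425,"D"),(125,"D"),(315,"Oe"),(325,"Ue")]

-- "KEYERR" marks lookup's KeyError (outside Pre_)
def pvClassifyA (f m l : String) : String :=
  if pvEncode m = 3 then "TP"
  else if pvEncode m = 4 then "TN"
  else (PySem.Dict.get? pvLookup (100 * pvEncode f + 10 * pvEncode m + pvEncode l)).getD "KEYERR"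

-- the inner `while r_label[i+j] == r_label[i+j+1]: j+=1`: j+1 frames belong to the run
def pvLeadRun : List String → Nat
  | a :: b :: t => if a = b then 1 + pvLeadRun (b :: t) else 1
  | _ => 1

theorem pvLeadRun_pos (rl : List String) : 0 < pvLeadRun rl := by
  unfold pvLeadRun; split <;> first | (split <;> simp) | simp

-- A's outer while loop; the slice assignment `final[i:i+j+1] = [seg ...]` becomes the
-- replicated block emitted for the run; `getD … "END"` is r_label[i+j+1] (always in
-- range: the "END" sentinel terminates every run inside Pre_)
def pvALoop (last : String) (rl : List String) : List String :=
  match rl with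
  | [] => []
  | x :: t =>
    if x = "END" then x :: t
    else
      let n := pvLeadRun (x :: t)
      let nxt := (x :: t).getD n "END"
      let seg := pvClassifyA last x nxt
      List.replicate n seg ++ pvALoop x ((x :: t).drop n)
termination_by rl.length
decreasing_by
  have h1 := pvLeadRun_pos (x :: t)
  simp only [List.length_drop, List.length_cons]
  omega

def pvCountOf (final : List String) : List (String × Int) :=
  [("TP", PySem.List.count final "TP"),
   ("TN", PySem.List.count final "TN"),
   ("M",  PySem.List.count final "M"),
   ("I",  PySem.List.count final "I"),
   ("D",  PySem.List.count final "D"),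
   ("F",  PySem.List.count final "F"),
   ("U",  PySem.List.count final "Us" + PySem.List.count final "Ue"),
   ("O",  PySem.List.count final "Os" + PySem.List.count final "Oe"),
   ("total", (final.length : Int))]

def new_score (labels : List String) (result : List Int) : List (String × Int) :=
  let labs := labels.map pvConv
  let res := pvAdjust labels result
  let r_label := pvRLabel res labs
  let final := pvALoop "START" (r_label ++ ["END"])
  pvCountOf (PySem.List.slice final none (some (-1)))

-- ===== PORT B =====

-- Source B's segment_kind: decision tree, Us/Ue already folded to "U" and Os/Oe to "O"
def pvSegKind (prev cur nxt : String) : String :=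
  if cur = "TP" then "TP"
  else if cur = "TN" then "TN"
  else if cur = "FP" then
    if prev = "TP" then (if nxt = "TP" then "M" else "O")
    else if nxt = "TP" then "O"
    else if prev = "START" then "M" else "I"
  else
    if prev = "TP" then (if nxt = "TP" then "F" else "U")
    else if nxt = "TP" then "U"
    else "D"

-- the forward pass: prevd[i] = frames[i-1] if it differs from frames[i] else prevd[i-1],
-- prevd[0] = 'START'; the loop state `last` is threaded through the recursion
def pvPrevd : String → List String → List String
  | _, [] => []
  | last, f :: t =>
      last :: pvPrevd (match t with
                       | g :: _ => if g = f then last else f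
                       | [] => last) t

-- the backward pass: nextd[i] = frames[i+1] if it differs from frames[i] else nextd[i+1],
-- nextd[n-1] = 'END'
def pvNextd : List String → List String
  | [] => []
  | [_] => ["END"]
  | f :: g :: t => (if g = f then (pvNextd (g :: t)).headD "END" else g) :: pvNextd (g :: t)

-- Source B's tally loop over zip(prevd, frames, nextd); `counts[k] += 1` is Dict.modify with
-- default 0 (exact here: both keys are always present in the dict literal)
def pvCLoop : PySem.Dict String Int → List (String × String × String) → PySem.Dict String Int
  | d, [] => d
  | d, (p, c, nx) :: t =>
      pvCLoop ((d.modify (pvSegKind p c nx) 0 (· + 1)).modify "total" 0 (· + 1)) t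

def new_score_alt (labels : List String) (result : List Int) : List (String × Int) :=
  let labs := labels.map pvConv
  let res := pvAdjust labels result
  let frames := (res.zip labs).map (fun p => pvFrame p.1 p.2)
  let prevd := pvPrevd "START" frames
  let nextd := pvNextd frames
  let counts := pvCLoop
    (PySem.Dict.ofList [("TP", 0), ("TN", 0), ("M", 0), ("I", 0), ("D", 0), ("F", 0),
                        ("U", 0), ("O", 0), ("total", 0)])
    (prevd.zip (frames.zip nextd))
  counts.items

-- ===== PRECONDITION & SPEC =====
-- Pre_ excludes exactly the inputs on which A raises: a length difference outside
-- {0,1,2} (AssertionError), an adjusted result value other than 0/1 (Exception), and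
-- the inputs whose whole frame sequence is one nonempty run of FP or of FN, where A's
-- lookup table lacks the keys '015'/'025' (KeyError).
def Pre_new_score (labels : List String) (result : List Int) : Prop :=
  ((result.length : Int) - (labels.length : Int) = 0 ∨
   (result.length : Int) - (labels.length : Int) = 1 ∨
   (result.length : Int) - (labels.length : Int) = 2) ∧
  (∀ x ∈ pvAdjust labels result, x = 0 ∨ x = 1) ∧
  ¬(labels ≠ [] ∧
    (((∀ x ∈ pvAdjust labels result, x = 1) ∧ (∀ s ∈ labels, s ≠ "shearing")) ∨
     ((∀ x ∈ pvAdjust labels result, x = 0) ∧ (∀ s ∈ labels, s ≠ "catch_drag"))))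

instance (labels : List String) (result : List Int) : Decidable (Pre_new_score labels result) := by
  unfold Pre_new_score; infer_instance

def pvWitness_new_score : List String × List Int := (["shearing", "x"], [1, 1])

def Spec_new_score (labels : List String) (result : List Int) (out : List (String × Int)) : Prop := out = new_score_alt labels result
instance (labels : List String) (result : List Int) (out : List (String × Int)) : Decidable (Spec_new_score labels result out) := by unfold Spec_new_score; infer_instance

-- ===== CLAIM (what is proved, stated in full; the proofs are below) =====
def Claim_equal_new_score : Prop := ∀ (labels : List String) (result : List Int), Dom_new_score labels result → Pre_new_score labels result → Spec_new_score labels result (new_score labels result)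

-- ===== LEMMAS AND PROOFS =====

-- proof-side helpers: A's loop seen as runs (groupby-style), only used by the proof
def pvGroupGo (cur : String) (n : Nat) : List String → List (String × Nat)
  | [] => [(cur, n)]
  | y :: t => if y == cur then pvGroupGo cur (n + 1) t else (cur, n) :: pvGroupGo y 1 t

def pvGroupRuns : List String → List (String × Nat)
  | [] => []
  | x :: t => pvGroupGo x 1 t

def pvNextKey : List (String × Nat) → String
  | (k, _) :: _ => k
  | [] => "END"

def pvSegsA (prev : String) : List (String × Nat) → List String
  | [] => []
  | (k, n) :: rest => List.replicate n (pvClassifyA prev k (pvNextKey rest)) ++ pvSegsA k rest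

def pvTripleOK (f m l : String) : Prop :=
  m ∈ ["TP", "TN", "FP", "FN"] ∧ f ∈ ["START", "TP", "TN", "FP", "FN"] ∧
  l ∈ ["TP", "TN", "FP", "FN", "END"] ∧ m ≠ f ∧ m ≠ l ∧
  ¬(f = "START" ∧ l = "END" ∧ (m = "FP" ∨ m = "FN"))

def pvAdm : String → List (String × Nat) → Prop
  | _, [] => True
  | prev, (k, _) :: rest => pvTripleOK prev k (pvNextKey rest) ∧ pvAdm k rest

def pvFold (s : String) : String :=
  if s = "Us" ∨ s = "Ue" then "U" else if s = "Os" ∨ s = "Oe" then "O" else s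

-- B's per-frame segment list
def pvSegList (last : String) (fs : List String) : List String :=
  ((pvPrevd last fs).zip (fs.zip (pvNextd fs))).map (fun t => pvSegKind t.1 t.2.1 t.2.2)

-- classify agrees with the decision tree (after folding Us/Ue→U, Os/Oe→O) on every
-- admissible triple, and always lands in the ten segment tags
theorem pvClassify_ok : ∀ f ∈ ["START", "TP", "TN", "FP", "FN"], ∀ m ∈ ["TP", "TN", "FP", "FN"],
    ∀ l ∈ ["TP", "TN", "FP", "FN", "END"], m ≠ f → m ≠ l →
    ¬(f = "START" ∧ l = "END" ∧ (m = "FP" ∨ m = "FN")) →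
    pvFold (pvClassifyA f m l) = pvSegKind f m l ∧
      pvClassifyA f m l ∈ ["TP", "TN", "M", "I", "D", "F", "Us", "Ue", "Os", "Oe"] := by
  decide

theorem pvClassify_ok' {f m l : String} (h : pvTripleOK f m l) :
    pvFold (pvClassifyA f m l) = pvSegKind f m l ∧
      pvClassifyA f m l ∈ ["TP", "TN", "M", "I", "D", "F", "Us", "Ue", "Os", "Oe"] := by
  obtain ⟨hm, hf, hl, hmf, hml, hbad⟩ := h
  exact pvClassify_ok f hf m hm l hl hmf hml hbad

-- groupby characterisation
theorem pvGroupGo_spec : ∀ (t : List String) (cur : String) (n : Nat),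
    pvGroupGo cur n t = (cur, n + (t.takeWhile (fun y => y == cur)).length) ::
      pvGroupRuns (t.dropWhile (fun y => y == cur)) := by
  intro t
  induction t with
  | nil => intro cur n; simp [pvGroupGo, pvGroupRuns]
  | cons y t ih =>
    intro cur n
    by_cases h : y = cur
    · subst h
      simp only [pvGroupGo, beq_self_eq_true, if_true, ih, List.takeWhile_cons,
        List.dropWhile_cons, List.length_cons]
      have harith : n + 1 + (List.takeWhile (fun y_1 => y_1 == y) t).length
          = n + ((List.takeWhile (fun y_1 => y_1 == y) t).length + 1) := by omega
      rw [harith]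
    · have hb : (y == cur) = false := by simp [h]
      simp [pvGroupGo, hb, List.takeWhile_cons, List.dropWhile_cons, pvGroupRuns]

theorem pvGroupRuns_cons (x : String) (t : List String) :
    pvGroupRuns (x :: t) = (x, 1 + (t.takeWhile (fun y => y == x)).length) ::
      pvGroupRuns (t.dropWhile (fun y => y == x)) := by
  rw [show pvGroupRuns (x :: t) = pvGroupGo x 1 t from rfl, pvGroupGo_spec]

theorem pvLeadRun_take : ∀ (t : List String) (x : String),
    pvLeadRun (x :: t) = 1 + (t.takeWhile (fun y => y == x)).length := by
  intro t
  induction t with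
  | nil => intro x; simp [pvLeadRun]
  | cons b r ih =>
    intro x
    by_cases h : x = b
    · subst h
      simp [pvLeadRun, ih]
      omega
    · have hb : (b == x) = false := beq_eq_false_iff_ne.mpr (fun hh => h hh.symm)
      simp [pvLeadRun, h, hb]

-- A's loop rewrites the array into the concatenation of the classified runs
theorem pvALoop_end (prev : String) : pvALoop prev ["END"] = ["END"] := by
  rw [pvALoop]
  simp

theorem pvDropWhile_head_false {p : String → Bool} :
    ∀ (t : List String) (y : String) (r : List String), t.dropWhile p = y :: r → p y = false := by
  intro t
  induction t with
  | nil => intro y r h; simp at h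
  | cons a t ih =>
    intro y r h
    rw [List.dropWhile_cons] at h
    by_cases hp : p a
    · simp only [hp, if_true] at h
      exact ih y r h
    · simp only [hp, if_false] at h
      cases h
      simpa using hp

theorem pvTakeWhile_append_single (p : String → Bool) (e : String) (he : p e = false) :
    ∀ t : List String, (t ++ [e]).takeWhile p = t.takeWhile p := by
  intro t
  induction t with
  | nil => simp [List.takeWhile_cons, he]
  | cons a t ih => by_cases hp : p a <;> simp [List.takeWhile_cons, hp, ih]

theorem pvDropWhile_append_single (p : String → Bool) (e : String) (he : p e = false) :
    ∀ t : List String, (t ++ [e]).dropWhile p = t.dropWhile p ++ [e] := by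
  intro t
  induction t with
  | nil => simp [List.dropWhile_cons, he]
  | cons a t ih => by_cases hp : p a <;> simp [List.dropWhile_cons, hp, ih]

theorem pvALoop_eq : ∀ (n : Nat) (rl : List String), rl.length ≤ n → "END" ∉ rl →
    ∀ prev, pvALoop prev (rl ++ ["END"]) = pvSegsA prev (pvGroupRuns rl) ++ ["END"] := by
  intro n
  induction n with
  | zero =>
    intro rl hn _ prev
    have hnil : rl = [] := List.eq_nil_of_length_eq_zero (by omega)
    subst hnil
    simpa [pvGroupRuns, pvSegsA] using pvALoop_end prev
  | succ n ih =>
    intro rl hn hend prev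
    match rl with
    | [] => simpa [pvGroupRuns, pvSegsA] using pvALoop_end prev
    | x :: t =>
      have hx : x ≠ "END" := fun h => hend (h ▸ List.mem_cons_self)
      have hendt : "END" ∉ t := fun h => hend (List.mem_cons_of_mem _ h)
      have hbeq : ((fun y => y == x) "END") = false := by
        simp only [beq_eq_false_iff_ne]
        exact fun h => hx h.symm
      have htw := pvTakeWhile_append_single (fun y => y == x) "END" hbeq t
      have hdw := pvDropWhile_append_single (fun y => y == x) "END" hbeq t
      have hsplit := List.takeWhile_append_dropWhile (p := fun y => y == x) (l := t)
      rw [show ((x :: t) ++ ["END"]) = x :: (t ++ ["END"]) from rfl, pvALoop]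
      simp only [if_neg hx]
      have hlead : pvLeadRun (x :: (t ++ ["END"]))
          = 1 + (t.takeWhile (fun y => y == x)).length := by
        rw [pvLeadRun_take, htw]
      have hgetD : (x :: (t ++ ["END"])).getD (pvLeadRun (x :: (t ++ ["END"]))) "END"
          = pvNextKey (pvGroupRuns (t.dropWhile (fun y => y == x))) := by
        rw [hlead]
        have : (x :: (t ++ ["END"])).getD (1 + (t.takeWhile (fun y => y == x)).length) "END"
            = (t ++ ["END"]).getD ((t.takeWhile (fun y => y == x)).length) "END" := by
          have harith : 1 + (t.takeWhile (fun y => y == x)).length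
              = (t.takeWhile (fun y => y == x)).length + 1 := by omega
          rw [harith]
          rfl
        rw [this]
        have ht2 : t ++ ["END"] = t.takeWhile (fun y => y == x)
            ++ (t.dropWhile (fun y => y == x) ++ ["END"]) := by
          rw [← List.append_assoc, hsplit]
        rw [ht2, List.getD_append_right _ _ _ _ (le_refl _), Nat.sub_self]
        cases hcase : t.dropWhile (fun y => y == x) with
        | nil => simp [pvGroupRuns, pvNextKey]
        | cons y r => simp [pvGroupRuns_cons, pvNextKey]
      have hdrop : (x :: (t ++ ["END"])).drop (pvLeadRun (x :: (t ++ ["END"])))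
          = t.dropWhile (fun y => y == x) ++ ["END"] := by
        rw [hlead]
        have harith : 1 + (t.takeWhile (fun y => y == x)).length
            = (t.takeWhile (fun y => y == x)).length + 1 := by omega
        rw [harith]
        rw [show (x :: (t ++ ["END"])).drop ((t.takeWhile (fun y => y == x)).length + 1)
            = (t ++ ["END"]).drop ((t.takeWhile (fun y => y == x)).length) from rfl]
        have ht2 : t ++ ["END"] = t.takeWhile (fun y => y == x)
            ++ (t.dropWhile (fun y => y == x) ++ ["END"]) := by
          rw [← List.append_assoc, hsplit]
        rw [ht2, List.drop_left]
      rw [hgetD, hdrop]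
      have hlen2 : (t.dropWhile (fun y => y == x)).length ≤ n := by
        have h1 := List.length_dropWhile_le (fun y => y == x) t
        simp only [List.length_cons] at hn
        omega
      have hend2 : "END" ∉ t.dropWhile (fun y => y == x) := fun h =>
        hendt ((List.dropWhile_sublist _).mem h)
      rw [ih _ hlen2 hend2 x]
      rw [pvGroupRuns_cons]
      rw [show pvSegsA prev ((x, 1 + (t.takeWhile (fun y => y == x)).length)
            :: pvGroupRuns (t.dropWhile (fun y => y == x)))
          = List.replicate (1 + (t.takeWhile (fun y => y == x)).length)
              (pvClassifyA prev x (pvNextKey (pvGroupRuns (t.dropWhile (fun y => y == x)))))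
            ++ pvSegsA x (pvGroupRuns (t.dropWhile (fun y => y == x))) from rfl]
      rw [hlead, List.append_assoc]

-- the run list of an admissible frame sequence is admissible
theorem pvAdm_groupRuns : ∀ (n : Nat) (rl : List String), rl.length ≤ n →
    (∀ s ∈ rl, s ∈ ["TP", "TN", "FP", "FN"]) →
    ∀ prev, prev ∈ ["START", "TP", "TN", "FP", "FN"] →
    (∀ y, rl.head? = some y → y ≠ prev) →
    ¬(prev = "START" ∧ rl ≠ [] ∧ ((∀ s ∈ rl, s = "FP") ∨ (∀ s ∈ rl, s = "FN"))) →
    pvAdm prev (pvGroupRuns rl) := by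
  intro n
  induction n with
  | zero =>
    intro rl hn _ prev _ _ _
    have hnil : rl = [] := List.eq_nil_of_length_eq_zero (by omega)
    subst hnil
    simp [pvGroupRuns, pvAdm]
  | succ n ih =>
    intro rl hn hmem prev hprev hne hbad
    match rl with
    | [] => simp [pvGroupRuns, pvAdm]
    | x :: t =>
      have hxmem : x ∈ ["TP", "TN", "FP", "FN"] := hmem x List.mem_cons_self
      have hxprev : x ≠ prev := hne x rfl
      rw [pvGroupRuns_cons]
      refine ⟨⟨hxmem, hprev, ?_, hxprev, ?_, ?_⟩, ?_⟩
      · cases hcase : t.dropWhile (fun y => y == x) with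
        | nil => simp [hcase, pvGroupRuns, pvNextKey]
        | cons y r =>
          have hy : y ∈ t := (List.dropWhile_sublist _).mem (hcase ▸ List.mem_cons_self)
          have := hmem y (List.mem_cons_of_mem _ hy)
          simp only [hcase, pvGroupRuns_cons, pvNextKey]
          simp only [List.mem_cons] at this ⊢
          tauto
      · cases hcase : t.dropWhile (fun y => y == x) with
        | nil =>
          simp only [hcase, pvGroupRuns, pvNextKey]
          simp only [List.mem_cons, List.not_mem_nil, or_false] at hxmem
          rcases hxmem with rfl | rfl | rfl | rfl <;> simp
        | cons y r =>
          have hfalse := pvDropWhile_head_false t y r hcase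
          simp only [hcase, pvGroupRuns_cons, pvNextKey]
          intro hxy
          rw [hxy] at hfalse
          simp at hfalse
      · rintro ⟨hfS, hlE, hm⟩
        have hnil : t.dropWhile (fun y => y == x) = [] := by
          cases hcase : t.dropWhile (fun y => y == x) with
          | nil => rfl
          | cons y r =>
            rw [hcase] at hlE
            have hy : y ∈ t := (List.dropWhile_sublist _).mem (hcase ▸ List.mem_cons_self)
            have hymem := hmem y (List.mem_cons_of_mem _ hy)
            simp only [pvGroupRuns_cons, pvNextKey] at hlE
            subst hlE
            simp at hymem
        have hall : ∀ y ∈ t, y = x := by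
          intro y hy
          have := List.dropWhile_eq_nil_iff.mp hnil y hy
          simpa using this
        refine hbad ⟨hfS, by simp, ?_⟩
        rcases hm with rfl | rfl
        · exact Or.inl (by
            intro s hs
            rcases List.mem_cons.mp hs with rfl | hs
            · rfl
            · exact hall s hs)
        · exact Or.inr (by
            intro s hs
            rcases List.mem_cons.mp hs with rfl | hs
            · rfl
            · exact hall s hs)
      · refine ih (t.dropWhile (fun y => y == x)) ?_ ?_ x ?_ ?_ ?_
        · have := List.length_dropWhile_le (fun y => y == x) t
          simp only [List.length_cons] at hn
          omega
        · exact fun s hs => hmem s (List.mem_cons_of_mem _ ((List.dropWhile_sublist _).mem hs))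
        · simp only [List.mem_cons] at hxmem ⊢
          tauto
        · intro y hy
          cases hcase : t.dropWhile (fun y => y == x) with
          | nil => rw [hcase] at hy; simp at hy
          | cons z r =>
            rw [hcase] at hy
            simp only [List.head?_cons, Option.some.injEq] at hy
            have hfalse := pvDropWhile_head_false t z r hcase
            intro hyx
            rw [hy, hyx] at hfalse
            simp at hfalse
        · rintro ⟨hxS, _, _⟩
          simp only [List.mem_cons, List.not_mem_nil, or_false] at hxmem
          rcases hxmem with rfl | rfl | rfl | rfl <;> simp at hxS

-- r_label facts
theorem pvRLabel_eq_map : ∀ (rs : List Int) (ls : List (Sum Int String)),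
    pvRLabel rs ls = (rs.zip ls).map (fun p => pvFrame p.1 p.2) := by
  intro rs
  induction rs with
  | nil => intro ls; cases ls <;> simp [pvRLabel]
  | cons r rt ih => intro ls; cases ls <;> simp [pvRLabel, ih]

theorem pvRLabel_mem : ∀ (rs : List Int) (ls : List (Sum Int String)),
    (∀ x ∈ rs, x = 0 ∨ x = 1) → ∀ s ∈ pvRLabel rs ls, s ∈ ["TP", "TN", "FP", "FN"] := by
  intro rs
  induction rs with
  | nil => intro ls h s hs; cases ls <;> simp [pvRLabel] at hs
  | cons r rt ih =>
    intro ls h s hs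
    cases ls with
    | nil => simp [pvRLabel] at hs
    | cons l lt =>
      simp only [pvRLabel, List.mem_cons] at hs
      rcases hs with rfl | hs
      · rcases h r (by simp) with rfl | rfl <;> (unfold pvFrame; split_ifs <;> simp_all)
      · exact ih lt (fun x hx => h x (by simp [hx])) s hs

theorem pvRLabel_len : ∀ (rs : List Int) (ls : List (Sum Int String)),
    rs.length = ls.length → (pvRLabel rs ls).length = rs.length := by
  intro rs
  induction rs with
  | nil => intro ls _; simp [pvRLabel]
  | cons r rt ih =>
    intro ls h
    cases ls with
    | nil => simp at h
    | cons l lt => simp only [pvRLabel, List.length_cons]; rw [ih lt (by simpa using h)]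

theorem pvRLabel_allFP : ∀ (rs : List Int) (ls : List String), rs.length = ls.length →
    (∀ s ∈ pvRLabel rs (ls.map pvConv), s = "FP") →
    (∀ x ∈ rs, x = 1) ∧ (∀ s ∈ ls, s ≠ "shearing") := by
  intro rs
  induction rs with
  | nil =>
    intro ls h _
    cases ls with
    | nil => simp
    | cons l lt => simp at h
  | cons r rt ih =>
    intro ls h hall
    cases ls with
    | nil => simp at h
    | cons l lt =>
      have hhd := hall (pvFrame r (pvConv l)) (by simp [pvRLabel])
      have htl := ih lt (by simpa using h) (fun s hs => hall s (by simp [pvRLabel, hs]))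
      have hr : r = 1 ∧ l ≠ "shearing" := by
        by_cases h1 : r = 1
        · subst h1
          refine ⟨rfl, ?_⟩
          intro hl
          subst hl
          simp [pvFrame, pvConv] at hhd
        · exfalso
          by_cases h0 : r = 0 <;> simp [pvFrame, h1, h0] at hhd <;> revert hhd <;> split_ifs <;> simp
      refine ⟨?_, ?_⟩
      · intro x hx
        rcases List.mem_cons.mp hx with rfl | hx
        · exact hr.1
        · exact htl.1 x hx
      · intro s hs
        rcases List.mem_cons.mp hs with rfl | hs
        · exact hr.2
        · exact htl.2 s hs

theorem pvRLabel_allFN : ∀ (rs : List Int) (ls : List String), rs.length = ls.length →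
    (∀ s ∈ pvRLabel rs (ls.map pvConv), s = "FN") →
    (∀ x ∈ rs, x = 0) ∧ (∀ s ∈ ls, s ≠ "catch_drag") := by
  intro rs
  induction rs with
  | nil =>
    intro ls h _
    cases ls with
    | nil => simp
    | cons l lt => simp at h
  | cons r rt ih =>
    intro ls h hall
    cases ls with
    | nil => simp at h
    | cons l lt =>
      have hhd := hall (pvFrame r (pvConv l)) (by simp [pvRLabel])
      have htl := ih lt (by simpa using h) (fun s hs => hall s (by simp [pvRLabel, hs]))
      have hr : r = 0 ∧ l ≠ "catch_drag" := by
        by_cases h0 : r = 0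
        · subst h0
          refine ⟨rfl, ?_⟩
          intro hl
          subst hl
          simp [pvFrame, pvConv] at hhd
        · exfalso
          by_cases h1 : r = 1 <;> simp [pvFrame, h1, h0] at hhd <;> revert hhd <;> split_ifs <;> simp
      refine ⟨?_, ?_⟩
      · intro x hx
        rcases List.mem_cons.mp hx with rfl | hx
        · exact hr.1
        · exact htl.1 x hx
      · intro s hs
        rcases List.mem_cons.mp hs with rfl | hs
        · exact hr.2
        · exact htl.2 s hs

theorem pvAdjust_len (labels : List String) (result : List Int)
    (hd : (result.length : Int) - (labels.length : Int) = 0 ∨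
          (result.length : Int) - (labels.length : Int) = 1 ∨
          (result.length : Int) - (labels.length : Int) = 2) :
    (pvAdjust labels result).length = labels.length := by
  unfold pvAdjust
  rcases hd with h0 | h1 | h2
  · have hne1 : ¬((result.length : Int) - (labels.length : Int) = 1) := by omega
    have hne2 : ¬((result.length : Int) - (labels.length : Int) > 1) := by omega
    simp only [hne1, hne2, if_false]
    omega
  · simp only [h1]
    norm_num [PySem.List.slice_from_one]
    omega
  · have hne1 : ¬((result.length : Int) - (labels.length : Int) = 1) := by omega
    have hgt : (result.length : Int) - (labels.length : Int) > 1 := by omega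
    simp only [hne1, hgt, if_false, if_true]
    rw [PySem.List.length_slice]
    simp only [PySem.List.clampIdx_neg_one]
    rw [show PySem.List.clampIdx result.length 1 = min 1 result.length from rfl]
    omega

-- ===== B-side lemmas =====

theorem pvZipRep {α β : Type} : ∀ (n : Nat) (a : α) (b : β),
    (List.replicate n a).zip (List.replicate n b) = List.replicate n (a, b) := by
  intro n
  induction n with
  | zero => intro a b; rfl
  | succ n ih => intro a b; simp [List.replicate_succ, ih]

theorem pvPrevd_length : ∀ (fs : List String) (last : String),
    (pvPrevd last fs).length = fs.length := by
  intro fs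
  induction fs with
  | nil => intro last; rfl
  | cons f t ih =>
    intro last
    cases t with
    | nil => rfl
    | cons g t' =>
      rw [show pvPrevd last (f :: g :: t')
          = last :: pvPrevd (if g = f then last else f) (g :: t') from rfl]
      simp [ih]

theorem pvNextd_length : ∀ (fs : List String), (pvNextd fs).length = fs.length := by
  intro fs
  induction fs with
  | nil => rfl
  | cons f t ih =>
    cases t with
    | nil => rfl
    | cons g t' => simp [pvNextd]; simpa using ih

-- the forward pass over a run: constant `last` on the run, then continue with x
theorem pvPrevd_run : ∀ (t : List String) (last x : String),
    pvPrevd last (x :: t)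
      = List.replicate (1 + (t.takeWhile (fun y => y == x)).length) last
        ++ pvPrevd x (t.dropWhile (fun y => y == x)) := by
  intro t
  induction t with
  | nil => intro last x; simp [pvPrevd]
  | cons g t' ih =>
    intro last x
    by_cases h : g = x
    · subst h
      rw [show pvPrevd last (g :: g :: t')
          = last :: pvPrevd (if g = g then last else g) (g :: t') from rfl]
      rw [if_pos rfl, ih last g]
      simp only [List.takeWhile_cons, List.dropWhile_cons, beq_self_eq_true, if_true,
        List.length_cons]
      rw [show 1 + ((List.takeWhile (fun y => y == g) t').length + 1)
          = (1 + (List.takeWhile (fun y => y == g) t').length) + 1 from by omega]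
      simp [List.replicate_succ]
    · have hb : (g == x) = false := by simp [h]
      rw [show pvPrevd last (x :: g :: t')
          = last :: pvPrevd (if g = x then last else x) (g :: t') from rfl]
      rw [if_neg h]
      simp [List.takeWhile_cons, List.dropWhile_cons, hb, List.replicate_succ]

-- the backward pass over a run: constant next-run value on the run
theorem pvNextd_run : ∀ (t : List String) (x : String),
    pvNextd (x :: t)
      = List.replicate (1 + (t.takeWhile (fun y => y == x)).length)
          ((t.dropWhile (fun y => y == x)).headD "END")
        ++ pvNextd (t.dropWhile (fun y => y == x)) := by
  intro t
  induction t with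
  | nil => intro x; simp [pvNextd]
  | cons g t' ih =>
    intro x
    by_cases h : g = x
    · subst h
      rw [show pvNextd (g :: g :: t')
          = (if g = g then (pvNextd (g :: t')).headD "END" else g) :: pvNextd (g :: t')
          from rfl]
      rw [if_pos rfl, ih g]
      have hhd : (List.replicate (1 + (List.takeWhile (fun y => y == g) t').length)
            ((List.dropWhile (fun y => y == g) t').headD "END")
          ++ pvNextd (List.dropWhile (fun y => y == g) t')).headD "END"
          = (List.dropWhile (fun y => y == g) t').headD "END" := by
        rw [show 1 + (List.takeWhile (fun y => y == g) t').length
            = (List.takeWhile (fun y => y == g) t').length + 1 from by omega]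
        simp [List.replicate_succ]
      rw [hhd]
      simp only [List.takeWhile_cons, List.dropWhile_cons, beq_self_eq_true, if_true,
        List.length_cons]
      rw [show 1 + ((List.takeWhile (fun y => y == g) t').length + 1)
          = (1 + (List.takeWhile (fun y => y == g) t').length) + 1 from by omega]
      simp [List.replicate_succ]
    · have hb : (g == x) = false := by simp [h]
      rw [show pvNextd (x :: g :: t')
          = (if g = x then (pvNextd (g :: t')).headD "END" else g) :: pvNextd (g :: t')
          from rfl]
      rw [if_neg h]
      simp [List.takeWhile_cons, List.dropWhile_cons, hb, List.replicate_succ]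

theorem pvTakeWhile_rep : ∀ (t : List String) (x : String),
    t.takeWhile (fun y => y == x)
      = List.replicate (t.takeWhile (fun y => y == x)).length x := by
  intro t x
  apply List.eq_replicate_of_mem
  intro b hb
  have := List.mem_takeWhile_imp hb
  simpa using this

-- B's per-frame segment list over a run
theorem pvSegList_run (t : List String) (last x : String) :
    pvSegList last (x :: t)
      = List.replicate (1 + (t.takeWhile (fun y => y == x)).length)
          (pvSegKind last x ((t.dropWhile (fun y => y == x)).headD "END"))
        ++ pvSegList x (t.dropWhile (fun y => y == x)) := by
  have hx : x :: t
      = List.replicate (1 + (t.takeWhile (fun y => y == x)).length) x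
        ++ t.dropWhile (fun y => y == x) := by
    calc x :: t
        = x :: (t.takeWhile (fun y => y == x) ++ t.dropWhile (fun y => y == x)) := by
          rw [List.takeWhile_append_dropWhile]
      _ = x :: (List.replicate (t.takeWhile (fun y => y == x)).length x
            ++ t.dropWhile (fun y => y == x)) := by rw [← pvTakeWhile_rep]
      _ = List.replicate (1 + (t.takeWhile (fun y => y == x)).length) x
            ++ t.dropWhile (fun y => y == x) := by
          rw [show 1 + (t.takeWhile (fun y => y == x)).length
              = (t.takeWhile (fun y => y == x)).length + 1 from by omega]
          simp [List.replicate_succ]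
  unfold pvSegList
  rw [pvPrevd_run, pvNextd_run]
  conv_lhs => rw [hx]
  rw [List.zip_append (by simp), pvZipRep]
  rw [List.zip_append (by simp [pvPrevd_length, pvNextd_length]), pvZipRep]
  simp [List.map_replicate]

-- B's per-frame pass equals (folded) run classification on admissible frame sequences
theorem pvSegList_eq : ∀ (n : Nat) (fs : List String), fs.length ≤ n →
    ∀ last, pvAdm last (pvGroupRuns fs) →
    pvSegList last fs = (pvSegsA last (pvGroupRuns fs)).map pvFold := by
  intro n
  induction n with
  | zero =>
    intro fs hn last _
    have hnil : fs = [] := List.eq_nil_of_length_eq_zero (by omega)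
    subst hnil
    rfl
  | succ n ih =>
    intro fs hn last hadm
    match fs with
    | [] => rfl
    | x :: t =>
      rw [pvGroupRuns_cons] at hadm
      obtain ⟨hT, hrest⟩ := hadm
      have hnk : pvNextKey (pvGroupRuns (t.dropWhile (fun y => y == x)))
          = (t.dropWhile (fun y => y == x)).headD "END" := by
        cases hcase : t.dropWhile (fun y => y == x) with
        | nil => simp [pvGroupRuns, pvNextKey]
        | cons y r => simp [pvGroupRuns_cons, pvNextKey]
      rw [pvSegList_run]
      have hlen2 : (t.dropWhile (fun y => y == x)).length ≤ n := by
        have := List.length_dropWhile_le (fun y => y == x) t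
        simp only [List.length_cons] at hn
        omega
      rw [ih _ hlen2 x hrest]
      rw [pvGroupRuns_cons]
      rw [show pvSegsA last ((x, 1 + (t.takeWhile (fun y => y == x)).length)
            :: pvGroupRuns (t.dropWhile (fun y => y == x)))
          = List.replicate (1 + (t.takeWhile (fun y => y == x)).length)
              (pvClassifyA last x (pvNextKey (pvGroupRuns (t.dropWhile (fun y => y == x)))))
            ++ pvSegsA x (pvGroupRuns (t.dropWhile (fun y => y == x))) from rfl]
      rw [List.map_append, List.map_replicate]
      rw [hnk] at hT ⊢
      rw [(pvClassify_ok' hT).1]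

theorem pvSegsA_mem : ∀ (runs : List (String × Nat)) (prev : String), pvAdm prev runs →
    ∀ s ∈ pvSegsA prev runs, s ∈ ["TP", "TN", "M", "I", "D", "F", "Us", "Ue", "Os", "Oe"] := by
  intro runs
  induction runs with
  | nil => intro prev _ s hs; simp [pvSegsA] at hs
  | cons kn rest ih =>
    obtain ⟨k, m⟩ := kn
    intro prev hadm s hs
    obtain ⟨hT, hrest⟩ := hadm
    rw [show pvSegsA prev ((k, m) :: rest)
        = List.replicate m (pvClassifyA prev k (pvNextKey rest)) ++ pvSegsA k rest from rfl] at hs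
    rcases List.mem_append.mp hs with hs | hs
    · have := List.eq_of_mem_replicate hs
      subst this
      exact (pvClassify_ok' hT).2
    · exact ih k hrest s hs

-- counting a folded ten-tag list
theorem pvFold_count : ∀ (L : List String),
    (∀ s ∈ L, s ∈ ["TP", "TN", "M", "I", "D", "F", "Us", "Ue", "Os", "Oe"]) →
    (L.map pvFold).count "TP" = L.count "TP" ∧ (L.map pvFold).count "TN" = L.count "TN" ∧
    (L.map pvFold).count "M" = L.count "M" ∧ (L.map pvFold).count "I" = L.count "I" ∧
    (L.map pvFold).count "D" = L.count "D" ∧ (L.map pvFold).count "F" = L.count "F" ∧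
    (L.map pvFold).count "U" = L.count "Us" + L.count "Ue" ∧
    (L.map pvFold).count "O" = L.count "Os" + L.count "Oe" := by
  intro L
  induction L with
  | nil => intro _; simp
  | cons a L ih =>
    intro h
    have ha := h a List.mem_cons_self
    have iH := ih (fun s hs => h s (List.mem_cons_of_mem _ hs))
    obtain ⟨h1, h2, h3, h4, h5, h6, h7, h8⟩ := iH
    simp only [List.mem_cons, List.not_mem_nil, or_false] at ha
    rcases ha with rfl | rfl | rfl | rfl | rfl | rfl | rfl | rfl | rfl | rfl <;>
      simp [pvFold, List.count_cons, h1, h2, h3, h4, h5, h6, h7, h8] <;> omega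

theorem pvSegKind_mem (p c n : String) :
    pvSegKind p c n ∈ ["TP", "TN", "M", "I", "D", "F", "U", "O"] := by
  unfold pvSegKind
  split_ifs <;> simp

-- one step of B's dict tally
theorem pvStep (k : String) (hk : k ∈ ["TP", "TN", "M", "I", "D", "F", "U", "O"])
    (a b c d e f g h i : Int) :
    ((PySem.Dict.mk [("TP", a), ("TN", b), ("M", c), ("I", d), ("D", e), ("F", f),
        ("U", g), ("O", h), ("total", i)]).modify k 0 (· + 1)).modify "total" 0 (· + 1)
    = PySem.Dict.mk [("TP", a + if k = "TP" then 1 else 0),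
        ("TN", b + if k = "TN" then 1 else 0), ("M", c + if k = "M" then 1 else 0),
        ("I", d + if k = "I" then 1 else 0), ("D", e + if k = "D" then 1 else 0),
        ("F", f + if k = "F" then 1 else 0), ("U", g + if k = "U" then 1 else 0),
        ("O", h + if k = "O" then 1 else 0), ("total", i + 1)] := by
  simp only [List.mem_cons, List.not_mem_nil, or_false] at hk
  rcases hk with rfl | rfl | rfl | rfl | rfl | rfl | rfl | rfl <;>
    (apply PySem.Dict.ext;
     simp [PySem.Dict.modify, PySem.Dict.getD, PySem.Dict.get?, PySem.Dict.insert,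
       PySem.Dict.contains])

-- B's tally loop, characterised
theorem pvCLoop_spec : ∀ (L : List (String × String × String)) (a b c d e f g h i : Int),
    (pvCLoop (PySem.Dict.mk [("TP", a), ("TN", b), ("M", c), ("I", d), ("D", e), ("F", f),
        ("U", g), ("O", h), ("total", i)]) L).items
    = [("TP", a + ((L.map fun t => pvSegKind t.1 t.2.1 t.2.2).count "TP" : Int)),
       ("TN", b + ((L.map fun t => pvSegKind t.1 t.2.1 t.2.2).count "TN" : Int)),
       ("M", c + ((L.map fun t => pvSegKind t.1 t.2.1 t.2.2).count "M" : Int)),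
       ("I", d + ((L.map fun t => pvSegKind t.1 t.2.1 t.2.2).count "I" : Int)),
       ("D", e + ((L.map fun t => pvSegKind t.1 t.2.1 t.2.2).count "D" : Int)),
       ("F", f + ((L.map fun t => pvSegKind t.1 t.2.1 t.2.2).count "F" : Int)),
       ("U", g + ((L.map fun t => pvSegKind t.1 t.2.1 t.2.2).count "U" : Int)),
       ("O", h + ((L.map fun t => pvSegKind t.1 t.2.1 t.2.2).count "O" : Int)),
       ("total", i + (L.length : Int))] := by
  intro L
  induction L with
  | nil => intro a b c d e f g h i; simp [pvCLoop, PySem.Dict.items]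
  | cons x t ih =>
    obtain ⟨p, c0, nx⟩ := x
    intro a b c d e f g h i
    rw [show pvCLoop (PySem.Dict.mk [("TP", a), ("TN", b), ("M", c), ("I", d), ("D", e),
        ("F", f), ("U", g), ("O", h), ("total", i)]) ((p, c0, nx) :: t)
      = pvCLoop (((PySem.Dict.mk [("TP", a), ("TN", b), ("M", c), ("I", d), ("D", e),
        ("F", f), ("U", g), ("O", h), ("total", i)]).modify (pvSegKind p c0 nx) 0
          (· + 1)).modify "total" 0 (· + 1)) t from rfl]
    rw [pvStep _ (pvSegKind_mem p c0 nx)]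
    rw [ih]
    simp only [List.map_cons, List.count_cons, List.length_cons]
    refine List.ext_getElem (by simp) ?_
    intro j h1 h2
    simp only [List.length_cons, List.length_nil] at h1
    interval_cases j <;>
      first
        | (simp; push_cast; split_ifs <;> simp_all <;> omega)
        | (simp; push_cast; omega)
        | simp

-- ===== VERDICT (by name: the statement is the Claim_ definition above) =====
theorem new_score_spec : Claim_equal_new_score := by
  intro labels result _ hpre
  obtain ⟨hd, hv, hbad⟩ := hpre
  unfold Spec_new_score
  simp only [new_score, new_score_alt]
  rw [← pvRLabel_eq_map]
  set frames := pvRLabel (pvAdjust labels result) (labels.map pvConv) with hframes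
  have hlenr : (pvAdjust labels result).length = labels.length := pvAdjust_len labels result hd
  have hlenl : (labels.map pvConv).length = labels.length := List.length_map ..
  have hlenrl : frames.length = (pvAdjust labels result).length :=
    pvRLabel_len _ _ (by omega)
  have hmem4 : ∀ s ∈ frames, s ∈ ["TP", "TN", "FP", "FN"] := pvRLabel_mem _ _ hv
  have hEnd : "END" ∉ frames := by
    intro h
    have := hmem4 _ h
    simp at this
  rw [pvALoop_eq frames.length _ le_rfl hEnd "START"]
  rw [PySem.List.slice_to_neg_one, List.dropLast_concat]
  have hadm : pvAdm "START" (pvGroupRuns frames) := by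
    refine pvAdm_groupRuns frames.length _ le_rfl hmem4 "START" (by simp) ?_ ?_
    · intro y hy
      have hymem := hmem4 y (List.mem_of_mem_head? hy)
      simp only [List.mem_cons, List.not_mem_nil, or_false] at hymem
      rcases hymem with rfl | rfl | rfl | rfl <;> simp
    · rintro ⟨-, hne', hall⟩
      apply hbad
      have hlab : labels ≠ [] := by
        intro h0
        subst h0
        apply hne'
        rw [hframes]
        show pvRLabel (pvAdjust [] result) (List.map pvConv []) = []
        cases pvAdjust ([] : List String) result <;> rfl
      refine ⟨hlab, ?_⟩
      rcases hall with hFP | hFN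
      · exact Or.inl (pvRLabel_allFP _ _ (by omega) hFP)
      · exact Or.inr (pvRLabel_allFN _ _ (by omega) hFN)
  -- B side
  rw [show (PySem.Dict.ofList [("TP", (0 : Int)), ("TN", 0), ("M", 0), ("I", 0), ("D", 0),
      ("F", 0), ("U", 0), ("O", 0), ("total", 0)])
    = PySem.Dict.mk [("TP", (0 : Int)), ("TN", 0), ("M", 0), ("I", 0), ("D", 0),
      ("F", 0), ("U", 0), ("O", 0), ("total", 0)] from rfl]
  rw [pvCLoop_spec]
  have hzipmap : ((pvPrevd "START" frames).zip (frames.zip (pvNextd frames))).map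
      (fun t => pvSegKind t.1 t.2.1 t.2.2) = pvSegList "START" frames := rfl
  have hziplen : ((pvPrevd "START" frames).zip (frames.zip (pvNextd frames))).length
      = (pvSegList "START" frames).length := by
    unfold pvSegList
    simp
  rw [hzipmap, hziplen]
  rw [pvSegList_eq frames.length _ le_rfl "START" hadm]
  have hmem10 := pvSegsA_mem _ _ hadm
  obtain ⟨h1, h2, h3, h4, h5, h6, h7, h8⟩ := pvFold_count _ hmem10
  simp [pvCountOf, PySem.List.count_eq, h1, h2, h3, h4, h5, h6, h7, h8, List.length_map]
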